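-- pv_equiv track=rewrite | github.com/tonyjameshart/Celiogix | services/smart_shopping.py | _assign_items_to_stores
-- ===== SOURCE A (Python) =====
-- from typing import Dict, List, Any, Optional, Tuple
--
-- def _assign_items_to_stores(shopping_list: List[Dict],
--                           preferred_stores: List[str]) -> Dict[str, List[Dict]]:
--     """Assign items to optimal stores"""
--     assignments = {store: [] for store in preferred_stores}
--
--     for item in shopping_list:
--         category = item.get('category', '').lower()
--
--         # Assign based on category and store specialization
--         if category in ['health', 'supplements', 'organic']:
--             if 'Health Food Store' in preferred_stores:
--                 assignments['Health Food Store'].append(item)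
--             else:
--                 assignments[preferred_stores[0]].append(item)
--         elif category in ['bulk', 'household']:
--             if 'Warehouse Store' in preferred_stores:
--                 assignments['Warehouse Store'].append(item)
--             else:
--                 assignments[preferred_stores[0]].append(item)
--         else:
--             # Default to first preferred store (usually grocery store)
--             assignments[preferred_stores[0]].append(item)
--
--     return assignments
-- ===== SOURCE B (Python) =====
-- _HEALTH = {'health', 'supplements', 'organic'}
-- _BULK = {'bulk', 'household'}
--
--
-- def _assign_items_to_stores(shopping_list, preferred_stores):
--     """Assign items to optimal stores: one filtering pass per store."""
--     if not preferred_stores: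
--         return {}
--     default = preferred_stores[0]
--     health_target = ('Health Food Store'
--                      if 'Health Food Store' in preferred_stores else default)
--     bulk_target = ('Warehouse Store'
--                    if 'Warehouse Store' in preferred_stores else default)
--
--     def target(item):
--         category = item.get('category', '').lower()
--         if category in _HEALTH:
--             return health_target
--         if category in _BULK:
--             return bulk_target
--         return default
--
--     targets = [target(item) for item in shopping_list]
--     return {store: [item for t, item in zip(targets, shopping_list) if t == store]
--             for store in preferred_stores}
-- ===== Notes on version B (the rewrite author's own statement) =====
-- stated objective: alternative
-- what changed: Replaces A's item-major accumulating pass (if/elif cascade appending into per-store lists) by a staged store-major version: hoist the store-membership tests, precompute each item's target store in one pass, then build the dict by one filtering comprehension per store.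
-- crash fix: When preferred_stores is empty and shopping_list is not, A raises IndexError on preferred_stores[0]; B returns the empty dict. — e.g. on _assign_items_to_stores([[("name", "milk")]], []): A raises IndexError, B returns []
import Mathlib
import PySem

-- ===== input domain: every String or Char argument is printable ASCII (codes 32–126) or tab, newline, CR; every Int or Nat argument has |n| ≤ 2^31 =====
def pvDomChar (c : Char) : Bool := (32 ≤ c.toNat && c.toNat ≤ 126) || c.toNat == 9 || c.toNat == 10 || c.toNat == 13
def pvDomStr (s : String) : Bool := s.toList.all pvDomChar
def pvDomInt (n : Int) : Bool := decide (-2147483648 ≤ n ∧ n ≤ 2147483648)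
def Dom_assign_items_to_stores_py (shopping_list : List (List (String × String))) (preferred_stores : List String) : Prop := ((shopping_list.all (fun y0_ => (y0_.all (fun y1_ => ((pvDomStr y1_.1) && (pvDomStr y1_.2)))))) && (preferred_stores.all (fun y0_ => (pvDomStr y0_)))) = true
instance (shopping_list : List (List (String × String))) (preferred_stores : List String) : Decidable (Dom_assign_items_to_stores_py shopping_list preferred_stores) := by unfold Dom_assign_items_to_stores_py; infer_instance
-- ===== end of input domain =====

-- B replaces A's item-major accumulating pass by a store-major dict comprehension that
-- filters the shopping list once per store (objective: alternative decomposition, same cost).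

-- ===== PORT A =====
-- one loop step of A's for-loop (the if/elif cascade); 'match ps with | [] => d'
-- marks the IndexError of preferred_stores[0], excluded by Pre_
def pvStepA (ps : List String) (d : PySem.Dict String (List (List (String × String))))
    (item : List (String × String)) : PySem.Dict String (List (List (String × String))) :=
  let category := PySem.Str.lower ((PySem.Dict.mk item).getD "category" "")
  if category ∈ ["health", "supplements", "organic"] then
    if "Health Food Store" ∈ ps then
      d.modify "Health Food Store" [] (· ++ [item])
    else
      match ps with
      | [] => d  -- preferred_stores[0] raises IndexError; excluded by Pre_
      | s :: _ => d.modify s [] (· ++ [item])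
  else if category ∈ ["bulk", "household"] then
    if "Warehouse Store" ∈ ps then
      d.modify "Warehouse Store" [] (· ++ [item])
    else
      match ps with
      | [] => d
      | s :: _ => d.modify s [] (· ++ [item])
  else
    match ps with
    | [] => d
    | s :: _ => d.modify s [] (· ++ [item])

def assign_items_to_stores_py (shopping_list : List (List (String × String))) (preferred_stores : List String) : List (String × List (List (String × String))) :=
  let assignments := preferred_stores.foldl
    (fun d s => d.insert s ([] : List (List (String × String)))) PySem.Dict.empty
  (shopping_list.foldl (pvStepA preferred_stores) assignments).items

-- ===== PORT B =====
-- Source B's inner 'target': the two special targets and the default are hoisted arguments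
def pvTarget (healthTarget bulkTarget dflt : String) (item : List (String × String)) : String :=
  let category := PySem.Str.lower ((PySem.Dict.mk item).getD "category" "")
  if category ∈ ["health", "supplements", "organic"] then healthTarget
  else if category ∈ ["bulk", "household"] then bulkTarget
  else dflt

-- the dict comprehension: for each store, filter the shopping list
def assign_items_to_stores_py_alt (shopping_list : List (List (String × String))) (preferred_stores : List String) : List (String × List (List (String × String))) :=
  match preferred_stores with
  | [] => []  -- 'if not preferred_stores: return {}'
  | p0 :: _ =>
    let dflt := p0  -- preferred_stores[0]
    let healthTarget := if "Health Food Store" ∈ preferred_stores then "Health Food Store" else dflt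
    let bulkTarget := if "Warehouse Store" ∈ preferred_stores then "Warehouse Store" else dflt
    let targets := shopping_list.map (pvTarget healthTarget bulkTarget dflt)
    (preferred_stores.foldl
      (fun d store => d.insert store
        (((targets.zip shopping_list).filter (fun p => p.1 == store)).map (fun p => p.2)))
      PySem.Dict.empty).items

-- ===== PRECONDITION & SPEC =====
-- A raises IndexError (preferred_stores[0]) exactly when preferred_stores is empty
-- while shopping_list is not; those inputs are excluded.
def Pre_assign_items_to_stores_py (shopping_list : List (List (String × String))) (preferred_stores : List String) : Prop :=
  preferred_stores ≠ [] ∨ shopping_list = []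
instance (shopping_list : List (List (String × String))) (preferred_stores : List String) : Decidable (Pre_assign_items_to_stores_py shopping_list preferred_stores) := by unfold Pre_assign_items_to_stores_py; infer_instance

def pvWitness_assign_items_to_stores_py : (List (List (String × String))) × List String :=
  ([[("category", "bulk"), ("name", "rice")], [("name", "milk")]], ["Grocery", "Warehouse Store"])

-- When preferred_stores is empty and shopping_list is not, A raises IndexError; B returns the empty dict.
def Raises_assign_items_to_stores_py (shopping_list : List (List (String × String))) (preferred_stores : List String) : Prop :=
  preferred_stores = [] ∧ shopping_list ≠ []
instance (shopping_list : List (List (String × String))) (preferred_stores : List String) : Decidable (Raises_assign_items_to_stores_py shopping_list preferred_stores) := by unfold Raises_assign_items_to_stores_py; infer_instance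
def pvRaiseWitness_assign_items_to_stores_py : (List (List (String × String))) × List String :=
  ([[("name", "milk")]], [])
def pvRaiseWitnessOut_assign_items_to_stores_py : List (String × List (List (String × String))) := []

def Spec_assign_items_to_stores_py (shopping_list : List (List (String × String))) (preferred_stores : List String) (out : List (String × List (List (String × String)))) : Prop := out = assign_items_to_stores_py_alt shopping_list preferred_stores
instance (shopping_list : List (List (String × String))) (preferred_stores : List String) (out : List (String × List (List (String × String)))) : Decidable (Spec_assign_items_to_stores_py shopping_list preferred_stores out) := by unfold Spec_assign_items_to_stores_py; infer_instance

-- ===== CLAIM =====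
def Claim_equal_assign_items_to_stores_py : Prop := ∀ (shopping_list : List (List (String × String))) (preferred_stores : List String), Dom_assign_items_to_stores_py shopping_list preferred_stores → Pre_assign_items_to_stores_py shopping_list preferred_stores → Spec_assign_items_to_stores_py shopping_list preferred_stores (assign_items_to_stores_py shopping_list preferred_stores)

def Claim_raises_assign_items_to_stores_py : Prop := (∀ (shopping_list : List (List (String × String))) (preferred_stores : List String), Dom_assign_items_to_stores_py shopping_list preferred_stores → Raises_assign_items_to_stores_py shopping_list preferred_stores → ¬ Pre_assign_items_to_stores_py shopping_list preferred_stores) ∧ (Dom_assign_items_to_stores_py (pvRaiseWitness_assign_items_to_stores_py.1) (pvRaiseWitness_assign_items_to_stores_py.2) ∧ Raises_assign_items_to_stores_py (pvRaiseWitness_assign_items_to_stores_py.1) (pvRaiseWitness_assign_items_to_stores_py.2) ∧ assign_items_to_stores_py_alt (pvRaiseWitness_assign_items_to_stores_py.1) (pvRaiseWitness_assign_items_to_stores_py.2) = pvRaiseWitnessOut_assign_items_to_stores_py)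

-- ===== LEMMAS AND PROOFS =====
-- the store A's cascade picks for an item, as a function (only used with ps nonempty)
def pvKey (ps : List String) (item : List (String × String)) : String :=
  let c := PySem.Str.lower ((PySem.Dict.mk item).getD "category" "")
  if c ∈ ["health", "supplements", "organic"] then
    (if "Health Food Store" ∈ ps then "Health Food Store" else ps.headD "")
  else if c ∈ ["bulk", "household"] then
    (if "Warehouse Store" ∈ ps then "Warehouse Store" else ps.headD "")
  else ps.headD ""

-- the two special-category lists are disjoint
lemma pvCats_disjoint (c : String) (h : c ∈ ["health", "supplements", "organic"]) :
    c ∉ ["bulk", "household"] := by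
  fin_cases h <;> simp

-- B's hoisted target equals pvKey on a nonempty store list
lemma pvTarget_eq_pvKey (s : String) (rest : List String) (item : List (String × String)) :
    pvTarget (if "Health Food Store" ∈ s :: rest then "Health Food Store" else s)
      (if "Warehouse Store" ∈ s :: rest then "Warehouse Store" else s) s item =
      pvKey (s :: rest) item := by
  unfold pvTarget pvKey
  dsimp only
  split_ifs <;> simp_all

-- A's step is 'modify at the key'
lemma pvStepA_eq (s : String) (rest : List String)
    (d : PySem.Dict String (List (List (String × String)))) (item : List (String × String)) :
    pvStepA (s :: rest) d item = d.modify (pvKey (s :: rest) item) [] (· ++ [item]) := by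
  unfold pvStepA pvKey
  dsimp only
  set c := PySem.Str.lower ((PySem.Dict.mk item).getD "category" "") with hc
  by_cases h1 : c ∈ ["health", "supplements", "organic"]
  · have h2 := pvCats_disjoint c h1
    by_cases hH : "Health Food Store" ∈ s :: rest <;> simp_all
  · by_cases h2 : c ∈ ["bulk", "household"] <;>
    by_cases hW : "Warehouse Store" ∈ s :: rest <;> simp_all

-- the key always lies in ps
lemma pvKey_mem (s : String) (rest : List String) (item : List (String × String)) :
    pvKey (s :: rest) item ∈ s :: rest := by
  unfold pvKey
  dsimp only
  split_ifs with h1 h2 h3 h4 <;> simp_all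

-- adding only already-present elements leaves a set unchanged
lemma set_update_of_subset (s : PySem.Set String) (l : List String)
    (h : ∀ y ∈ l, y ∈ s) : PySem.Set.update s l = s := by
  rw [PySem.Set.update_eq_append_filter]
  have hnil : (PySem.Set.ofList l).filter (fun y => !(PySem.Set.contains s y)) = [] := by
    apply List.filter_eq_nil_iff.mpr
    intro y hy
    have hys : y ∈ s := h y ((PySem.Set.mem_ofList l y).mp hy)
    simpa [PySem.Set.contains_iff] using hys
  rw [hnil, List.append_nil]

-- lookup in a fold of inserts whose value depends only on the key
lemma get?_foldl_insert_fun {α : Type} (v : String → α) (l : List String)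
    (d : PySem.Dict String α) (k : String) :
    (l.foldl (fun d s => d.insert s (v s)) d).get? k =
      if k ∈ l then some (v k) else d.get? k := by
  induction l generalizing d with
  | nil => simp
  | cons x xs ih =>
    simp only [List.foldl_cons, ih, PySem.Dict.get?_insert]
    by_cases hx : k = x <;> by_cases hm : k ∈ xs <;> simp [hx, hm]

-- ===== VERDICT =====
theorem assign_items_to_stores_py_spec : Claim_equal_assign_items_to_stores_py := by
  intro sl ps _ hpre
  unfold Spec_assign_items_to_stores_py
  unfold assign_items_to_stores_py assign_items_to_stores_py_alt
  rcases ps with _ | ⟨s, rest⟩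
  · rcases hpre with h | h
    · exact absurd rfl h
    · subst h; rfl
  · dsimp only
    set ps := s :: rest with hps
    set tg : List (String × String) → String :=
      pvTarget (if "Health Food Store" ∈ ps then "Health Food Store" else s)
        (if "Warehouse Store" ∈ ps then "Warehouse Store" else s) s with htg
    set v : String → List (List (String × String)) :=
      fun store => (((sl.map tg).zip sl).filter (fun p => p.1 == store)).map (fun p => p.2) with hv
    set init := ps.foldl (fun d t => d.insert t ([] : List (List (String × String)))) PySem.Dict.empty with hinit
    have hA : sl.foldl (pvStepA ps) init =
        (sl.map (fun it => (pvKey ps it, it))).foldl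
          (fun d p => d.modify p.1 [] (· ++ [p.2])) init := by
      rw [List.foldl_map]
      exact PySem.List.foldl_congr_mem sl _ _ init (fun d it _ => pvStepA_eq s rest d it)
    rw [hA]
    set dA := (sl.map (fun it => (pvKey ps it, it))).foldl
        (fun d p => d.modify p.1 [] (· ++ [p.2])) init with hdA
    set dB := ps.foldl (fun d store => d.insert store (v store)) PySem.Dict.empty with hdB
    have hinit_get : ∀ k, init.get? k =
        if k ∈ ps then some ([] : List (List (String × String))) else none := by
      intro k
      simpa using get?_foldl_insert_fun (fun _ => ([] : List (List (String × String)))) ps PySem.Dict.empty k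
    have hinit_keys : init.keys = PySem.Set.ofList ps := by
      rw [hinit, PySem.Dict.keys_foldl_insert]
      simp [PySem.Set.update_nil_left]
    have hA_keys : dA.keys = PySem.Set.ofList ps := by
      rw [hdA,
        PySem.Dict.keys_foldl_modify_key (sl.map (fun it => (pvKey ps it, it))) Prod.fst []
          (fun _ p w => w ++ [p.2]) init,
        hinit_keys]
      apply set_update_of_subset
      intro y hy
      rw [PySem.Set.mem_ofList]
      simp only [List.map_map, List.mem_map, Function.comp] at hy
      obtain ⟨it, _, rfl⟩ := hy
      exact pvKey_mem s rest it
    have hA_nodup : dA.keys.Nodup := by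
      rw [hA_keys]; exact PySem.Set.nodup_ofList ps
    have hB_keys : dB.keys = PySem.Set.ofList ps := by
      rw [hdB, PySem.Dict.keys_foldl_insert]
      simp [PySem.Set.update_nil_left]
    have hB_nodup : dB.keys.Nodup := by
      rw [hB_keys]; exact PySem.Set.nodup_ofList ps
    have hA_getD : ∀ k ∈ ps, dA.getD k [] = sl.filter (fun it => pvKey ps it == k) := by
      intro k hk
      rw [hdA, PySem.Dict.getD_foldl_modify_append]
      have h1 : init.getD k [] = [] := by
        rw [PySem.Dict.getD_eq_get?_getD, hinit_get k, if_pos hk]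
        rfl
      rw [h1, List.nil_append, List.filter_map]
      simp [Function.comp_def]
    have hB_getD : ∀ k ∈ ps, dB.getD k [] = sl.filter (fun it => pvKey ps it == k) := by
      intro k hk
      rw [hdB, PySem.Dict.getD_eq_get?_getD, get?_foldl_insert_fun v ps PySem.Dict.empty k,
        if_pos hk]
      show v k = _
      rw [hv]
      dsimp only
      rw [← List.map_prod_right_eq_zip, List.filter_map]
      simp only [Function.comp_def, List.map_map]
      rw [List.map_id']
      apply List.filter_congr
      intro it _
      rw [htg, pvTarget_eq_pvKey s rest it]
    rw [PySem.Dict.items_eq_map_keys dA hA_nodup [], PySem.Dict.items_eq_map_keys dB hB_nodup [],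
      hA_keys, hB_keys]
    apply List.map_congr_left
    intro k hk
    have hk' : k ∈ ps := (PySem.Set.mem_ofList ps k).mp hk
    rw [hA_getD k hk', hB_getD k hk']

@[simp]
theorem assign_items_to_stores_py_raises : Claim_raises_assign_items_to_stores_py := by
  unfold Claim_raises_assign_items_to_stores_py
  constructor
  · intro sl ps _ hr hpre
    unfold Raises_assign_items_to_stores_py at hr
    unfold Pre_assign_items_to_stores_py at hpre
    tauto
  · exact ⟨by decide, by decide, by decide⟩
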